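-- pv_equiv track=rewrite | github.com/Space-LEAF-corp/Main-private-files | giga atom/src/giga_atom/simulations.py | valence_from_Z
-- ===== SOURCE A (Python) =====
-- PHYSICAL_SHELLS = [2, 8, 18, 32, 50, 72, 98, 128]  # 2n^2 rule for shells 1..8
--
-- def valence_from_Z(Z: int) -> int:
--     """
--     Compute valence as electrons in outermost occupied shell using 2n^2 filling.
--     This is a simplified heuristic: fill shells sequentially with PHYSICAL_SHELLS capacities.
--     """
--     remaining = Z
--     last_filled = 0
--     for cap in PHYSICAL_SHELLS:
--         if remaining <= cap:
--             last_filled = remaining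
--             break
--         remaining -= cap
--     else:
--         # if Z > sum(PHYSICAL_SHELLS), approximate valence as remainder
--         last_filled = remaining
--     return int(last_filled)
-- ===== SOURCE B (Python) =====
-- from bisect import bisect_left
-- from itertools import accumulate
--
-- PHYSICAL_SHELLS = [2, 8, 18, 32, 50, 72, 98, 128]
-- _PREFIX = list(accumulate(PHYSICAL_SHELLS))
--
-- def valence_from_Z(Z: int) -> int:
--     """Occupancy of the outermost shell via a prefix table and binary search."""
--     i = bisect_left(_PREFIX, Z)
--     prev = _PREFIX[i - 1] if i > 0 else 0
--     return Z - prev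
-- ===== Notes on version B (the rewrite author's own statement) =====
-- stated objective: idiomatic
-- what changed: Replaces A's running-remainder linear scan over shell capacities with a precomputed prefix-sum table queried by bisect_left (binary search), returning Z minus the previous cumulative total.
import Mathlib
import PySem

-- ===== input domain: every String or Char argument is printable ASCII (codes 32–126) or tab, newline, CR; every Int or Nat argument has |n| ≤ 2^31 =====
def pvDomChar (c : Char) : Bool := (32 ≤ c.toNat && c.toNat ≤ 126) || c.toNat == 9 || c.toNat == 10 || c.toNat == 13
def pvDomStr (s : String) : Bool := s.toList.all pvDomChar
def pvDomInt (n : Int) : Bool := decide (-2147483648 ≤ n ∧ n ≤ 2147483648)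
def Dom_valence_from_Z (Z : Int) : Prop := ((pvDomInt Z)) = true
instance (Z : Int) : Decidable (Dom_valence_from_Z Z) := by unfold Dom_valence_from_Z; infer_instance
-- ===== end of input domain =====

-- B replaces A's running-remainder linear scan with a prefix-sum table plus binary search (idiomatic bisect); same values everywhere.

-- ===== PORT A =====
def PHYSICAL_SHELLS : List Int := [2, 8, 18, 32, 50, 72, 98, 128]

-- the for-loop with break/else: recurse over the caps, carrying `remaining`
def valenceLoop (remaining : Int) : List Int → Int
  | [] => remaining               -- for-else branch: last_filled = remaining
  | cap :: rest => if remaining ≤ cap then remaining else valenceLoop (remaining - cap) rest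

def valence_from_Z (Z : Int) : Int := valenceLoop Z PHYSICAL_SHELLS

-- ===== PORT B =====
def PREFIX_SHELLS : List Int := [2, 10, 28, 60, 110, 182, 280, 408]

-- bisect.bisect_left: binary search for the leftmost insertion point (fueled while-loop)
def bisectGo (a : List Int) (x : Int) : Nat → Nat → Nat → Nat
  | 0, lo, _ => lo
  | fuel + 1, lo, hi =>
    if lo < hi then
      let mid := (lo + hi) / 2
      if a.getD mid 0 < x then bisectGo a x fuel (mid + 1) hi
      else bisectGo a x fuel lo mid
    else lo

def bisectLeft (a : List Int) (x : Int) : Nat := bisectGo a x a.length 0 a.length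

def valence_from_Z_alt (Z : Int) : Int :=
  let i := bisectLeft PREFIX_SHELLS Z
  let prev : Int := if i > 0 then PREFIX_SHELLS.getD (i - 1) 0 else 0
  Z - prev

-- ===== PRECONDITION & SPEC =====
def Spec_valence_from_Z (Z : Int) (out : Int) : Prop := out = valence_from_Z_alt Z
instance (Z : Int) (out : Int) : Decidable (Spec_valence_from_Z Z out) := by unfold Spec_valence_from_Z; infer_instance

-- ===== CLAIM (what is proved, stated in full; the proofs are below) =====
def Claim_equal_valence_from_Z : Prop := ∀ (Z : Int), Dom_valence_from_Z Z → Spec_valence_from_Z Z (valence_from_Z Z)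

-- ===== LEMMAS AND PROOFS =====

-- ===== VERDICT (by name: the statement is the Claim_ definition above) =====
set_option maxHeartbeats 2000000 in
theorem valence_from_Z_spec : Claim_equal_valence_from_Z := by
  intro Z _
  unfold Spec_valence_from_Z valence_from_Z valence_from_Z_alt bisectLeft
  simp [valenceLoop, PHYSICAL_SHELLS, PREFIX_SHELLS, bisectGo, List.getD]
  split_ifs <;> (try omega) <;> (try simp) <;> omega
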